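-- pv_equiv track=rewrite | github.com/shanmukh-07/Owl-coder | Easy/Move all negative elements to end/move-all-negative-elements-to-end.py | segregateElements
-- ===== SOURCE A (Python) =====
-- def segregateElements(arr, n):
--     ps,ng = [],[]
--     for i in arr:
--         if i > 0:
--             ps.append(i)
--         else:
--             ng.append(i)
--     l = ps+ng
--     for i in range(n):
--         arr[i] = l[i]
--     return arr
-- ===== SOURCE B (Python) =====
-- def segregateElements(arr, n):
--     # stable sort with boolean key: positives (False) first, non-positives (True) last
--     l = sorted(arr, key=lambda x: x <= 0)
--     for i in range(n):
--         arr[i] = l[i]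
--     return arr
-- ===== Notes on version B (the rewrite author's own statement) =====
-- stated objective: idiomatic
-- what changed: A builds positive and non-positive lists with an explicit two-accumulator loop and concatenates them; B obtains the same partition with one stable sorted(arr, key=lambda x: x <= 0) call, then copies back with the same index loop.
import Mathlib
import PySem

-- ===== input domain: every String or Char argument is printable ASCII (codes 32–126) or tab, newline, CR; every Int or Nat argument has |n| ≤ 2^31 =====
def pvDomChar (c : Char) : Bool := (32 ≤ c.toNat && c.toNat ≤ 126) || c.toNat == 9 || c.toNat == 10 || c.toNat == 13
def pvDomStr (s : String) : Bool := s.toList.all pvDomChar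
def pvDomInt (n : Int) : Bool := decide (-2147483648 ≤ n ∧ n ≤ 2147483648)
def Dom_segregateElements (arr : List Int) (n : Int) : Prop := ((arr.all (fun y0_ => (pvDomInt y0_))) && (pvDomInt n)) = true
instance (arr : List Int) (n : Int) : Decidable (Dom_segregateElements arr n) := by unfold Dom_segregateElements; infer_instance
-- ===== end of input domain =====

-- B replaces A's two-accumulator partition by one stable sort with boolean key x <= 0
-- (positives first, non-positives last); the in-place copy-back loop is shared.
-- Both A and B mutate arr in place in Python; the equivalence proved is about the return value.

-- ===== PORT A =====
-- the copy-back loop 'for i in range(n): arr[i] = l[i]' (IndexError when l[i] is out of range, excluded by Pre_)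
def pvCopyLoop (l : List Int) (arr : List Int) (n : Int) : List Int :=
  (PySem.List.pyRange 0 n 1).foldl (fun a i =>
    match PySem.List.pyGet? l i with
    | some v => a.set i.toNat v
    | none => a) arr

def segregateElements (arr : List Int) (n : Int) : List Int :=
  let pn := arr.foldl (fun (p : List Int × List Int) i =>
    if i > 0 then (p.1 ++ [i], p.2) else (p.1, p.2 ++ [i])) ([], [])
  let l := pn.1 ++ pn.2
  pvCopyLoop l arr n

-- ===== PORT B =====
def segregateElements_alt (arr : List Int) (n : Int) : List Int :=
  let l := PySem.List.sorted arr (fun x => decide (x ≤ 0)) false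
  pvCopyLoop l arr n

-- ===== PRECONDITION & SPEC =====
-- A raises IndexError (on l[i] / arr[i]) exactly when n > len(arr); B raises there too.
def Pre_segregateElements (arr : List Int) (n : Int) : Prop := n ≤ (arr.length : Int)
instance (arr : List Int) (n : Int) : Decidable (Pre_segregateElements arr n) := by unfold Pre_segregateElements; infer_instance

def pvWitness_segregateElements : List Int × Int := ([3, -1, 0, 5, -2], 5)

def Spec_segregateElements (arr : List Int) (n : Int) (out : List Int) : Prop := out = segregateElements_alt arr n
instance (arr : List Int) (n : Int) (out : List Int) : Decidable (Spec_segregateElements arr n out) := by unfold Spec_segregateElements; infer_instance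

-- ===== CLAIM (what is proved, stated in full; the proofs are below) =====
def Claim_equal_segregateElements : Prop := ∀ (arr : List Int) (n : Int), Dom_segregateElements arr n → Pre_segregateElements arr n → Spec_segregateElements arr n (segregateElements arr n)

-- ===== LEMMAS AND PROOFS =====

-- insertBy skips a prefix none of whose elements come 'before' x
theorem pvInsertBy_skip {α : Type} (before : α → α → Bool) (x : α) (as bs : List α)
    (h : ∀ a ∈ as, before x a = false) :
    PySem.List.insertBy before x (as ++ bs) = as ++ PySem.List.insertBy before x bs := by
  induction as with
  | nil => simp
  | cons a as ih =>
    have ha : before x a = false := h a (by simp)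
    simp [PySem.List.insertBy, ha, ih (fun a' ha' => h a' (by simp [ha']))]

-- x none of whose predecessors comes after it goes to the very end
theorem pvInsertBy_last {α : Type} (before : α → α → Bool) (x : α) (ys : List α)
    (h : ∀ a ∈ ys, before x a = false) :
    PySem.List.insertBy before x ys = ys ++ [x] := by
  induction ys with
  | nil => rfl
  | cons a ys ih =>
    have ha : before x a = false := h a (by simp)
    simp [PySem.List.insertBy, ha, ih (fun a' ha' => h a' (by simp [ha']))]

-- inserting x at the head of a list whose head (if any) comes after x
theorem pvInsertBy_head {α : Type} (before : α → α → Bool) (x : α) (bs : List α)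
    (h : ∀ b ∈ bs, before x b = true) :
    PySem.List.insertBy before x bs = x :: bs := by
  cases bs with
  | nil => rfl
  | cons b bs => simp [PySem.List.insertBy, h b (by simp)]

-- stable sort by a Bool key = false-group (in order) ++ true-group (in order)
theorem pvSortedBool {α : Type} (k : α → Bool) (xs : List α) :
    PySem.List.sorted xs (fun x => k x) false
      = xs.filter (fun x => !(k x)) ++ xs.filter (fun x => k x) := by
  rw [PySem.List.sorted_eq_foldl_insertBy]
  induction xs using List.reverseRecOn with
  | nil => rfl
  | append_singleton xs x ih =>
    rw [List.foldl_append, List.foldl_cons, List.foldl_nil, ih]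
    by_cases hk : k x = true
    · have hall : ∀ a ∈ xs.filter (fun x => !(k x)) ++ xs.filter (fun x => k x),
          (decide (k x < k a)) = false := by
        intro a _
        simp [hk, Bool.lt_iff]
      rw [pvInsertBy_last _ x _ (fun a ha => hall a ha)]
      simp [List.filter_append, hk]
    · have hk' : k x = false := by simpa using hk
      have hskip : ∀ a ∈ xs.filter (fun x => !(k x)), (decide (k x < k a)) = false := by
        intro a ha
        have := List.of_mem_filter ha
        simp at this
        simp [hk', this]
      have hhead : ∀ b ∈ xs.filter (fun x => k x), (decide (k x < k b)) = true := by
        intro b hb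
        have := List.of_mem_filter hb
        simp [hk', this]
      rw [pvInsertBy_skip _ x _ _ hskip, pvInsertBy_head _ x _ hhead]
      simp [List.filter_append, hk']

-- A's partition loop, with the accumulators generalized
theorem pvPartLoop (xs : List Int) (p q : List Int) :
    xs.foldl (fun (p : List Int × List Int) i =>
      if i > 0 then (p.1 ++ [i], p.2) else (p.1, p.2 ++ [i])) (p, q)
      = (p ++ xs.filter (fun i => decide (i > 0)), q ++ xs.filter (fun i => !decide (i > 0))) := by
  induction xs generalizing p q with
  | nil => simp
  | cons x xs ih =>
    by_cases hx : x > 0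
    · simp [hx, ih]
    · simp [hx, ih]

-- the two lists copied back are equal
theorem pvListsEq (arr : List Int) :
    (arr.filter (fun i => decide (i > 0)), arr.filter (fun i => !decide (i > 0))).1
      ++ (arr.filter (fun i => decide (i > 0)), arr.filter (fun i => !decide (i > 0))).2
      = PySem.List.sorted arr (fun x => decide (x ≤ 0)) false := by
  rw [pvSortedBool (fun x => decide (x ≤ 0)) arr]
  have hx : ∀ x : Int, decide (0 < x) = !decide (x ≤ 0) := by
    intro x
    rw [← decide_not]
    exact decide_eq_decide.mpr not_le.symm
  congr 1
  · exact List.filter_congr (fun x _ => hx x)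
  · apply List.filter_congr
    intro x _
    rw [hx x, Bool.not_not]

-- ===== VERDICT (by name: the statement is the Claim_ definition above) =====
theorem segregateElements_spec : Claim_equal_segregateElements := by
  intro arr n _ _
  unfold Spec_segregateElements segregateElements segregateElements_alt
  rw [pvPartLoop arr [] []]
  simp only [List.nil_append]
  rw [show (arr.filter (fun i => decide (i > 0))) ++ (arr.filter (fun i => !decide (i > 0)))
        = PySem.List.sorted arr (fun x => decide (x ≤ 0)) false from pvListsEq arr]
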